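-- pv_equiv track=rewrite | github.com/danilobatistaqueiroz/search-in-dictionaries | pons.py | has_same_word
-- ===== SOURCE A (Python) =====
-- def has_same_word(definition,word):
--     pos = -1
--     size = len(word)
--     definition = definition.lower()
--     while True:
--         pos = definition.find(word,pos+1)
--         if pos == -1:
--             break
--         after_word = definition[pos+size:pos+size+1]
--         if ': ;,.-="_)(*!?+/[]'.find(after_word) > -1:
--             if pos > 0:
--                 if ': ;,.-="_)(*!?+/[]'.find(definition[pos-1:pos]) > -1:
--                     return True
--             else:
--                 return True
--     return False
-- ===== SOURCE B (Python) =====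
-- _DELIMS = set(': ;,.-="_)(*!?+/[]')
--
-- def has_same_word(definition, word):
--     d = definition.lower()
--     n, m = len(d), len(word)
--     return any(
--         d[i:i + m] == word
--         and (i == 0 or d[i - 1] in _DELIMS)
--         and (i + m == n or d[i + m] in _DELIMS)
--         for i in range(n - m + 1)
--     )
-- ===== Notes on version B (the rewrite author's own statement) =====
-- stated objective: simpler
-- what changed: A's while-loop of repeated str.find calls with break/early-return boundary re-checks is replaced by a single any() over every start position, testing slice equality and a delimiter-or-edge boundary predicate on both sides.
import Mathlib
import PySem

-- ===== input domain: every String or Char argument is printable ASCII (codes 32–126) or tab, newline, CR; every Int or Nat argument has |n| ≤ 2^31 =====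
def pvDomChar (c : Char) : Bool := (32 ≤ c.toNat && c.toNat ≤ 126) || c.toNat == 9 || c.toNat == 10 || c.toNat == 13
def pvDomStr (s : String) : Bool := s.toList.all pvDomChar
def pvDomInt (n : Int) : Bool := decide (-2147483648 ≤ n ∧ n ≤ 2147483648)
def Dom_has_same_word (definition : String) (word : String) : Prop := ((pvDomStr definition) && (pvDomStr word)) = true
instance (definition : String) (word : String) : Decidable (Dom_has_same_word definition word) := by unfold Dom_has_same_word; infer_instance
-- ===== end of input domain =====

-- B replaces A's repeated str.find loop (with its break/early-return boundary re-checks) by a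
-- single any() over all start positions with a boundary predicate; objective: simpler, not faster.

-- ===== PORT A =====
def pvDelims : List Char := ": ;,.-=\"_)(*!?+/[]".toList

-- A's 'while True' loop; the fuel argument only makes it total (pos strictly increases each
-- iteration, so d.length + 2 iterations always suffice — proved in pv_loop_iff below).
def pvHswLoop (d w : List Char) (size : Int) (pos : Int) : Nat → Bool
  | 0 => false
  | fuel + 1 =>
    let p := PySem.Chars.findFrom d w (pos + 1)
    if p = -1 then false
    else
      let after := PySem.Chars.slice d (some (p + size)) (some (p + size + 1))
      if PySem.Chars.find pvDelims after > -1 then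
        if p > 0 then
          if PySem.Chars.find pvDelims (PySem.Chars.slice d (some (p - 1)) (some p)) > -1 then
            true
          else pvHswLoop d w size p fuel
        else true
      else pvHswLoop d w size p fuel

def has_same_word (definition : String) (word : String) : Bool :=
  let size : Int := ((word.toList.length : Nat) : Int)
  let d := PySem.Chars.lower definition.toList
  pvHswLoop d word.toList size (-1) (d.length + 2)

-- ===== PORT B =====
def pvDelimSet : PySem.Set Char := PySem.Set.ofList ": ;,.-=\"_)(*!?+/[]".toList

-- Source B's any(...) over range(n - m + 1); the single-char indexings d[i-1] / d[i+m] are in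
-- range whenever evaluated (short-circuit), so pyGet? under Option.all is exact there.
def has_same_word_alt (definition : String) (word : String) : Bool :=
  let d := PySem.Chars.lower definition.toList
  let w := word.toList
  let n : Int := (d.length : Int)
  let m : Int := (w.length : Int)
  (PySem.List.pyRange 0 (n - m + 1) 1).any fun i =>
    (PySem.List.slice d (some i) (some (i + m)) == w)
      && (i == 0 || (PySem.List.pyGet? d (i - 1)).all (pvDelimSet.contains ·))
      && (i + m == n || (PySem.List.pyGet? d (i + m)).all (pvDelimSet.contains ·))

-- ===== PRECONDITION & SPEC =====
def Spec_has_same_word (definition : String) (word : String) (out : Bool) : Prop := out = has_same_word_alt definition word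
instance (definition : String) (word : String) (out : Bool) : Decidable (Spec_has_same_word definition word out) := by unfold Spec_has_same_word; infer_instance

-- ===== CLAIM (what is proved, stated in full; the proofs are below) =====
def Claim_equal_has_same_word : Prop := ∀ (definition : String) (word : String), Dom_has_same_word definition word → Spec_has_same_word definition word (has_same_word definition word)

-- ===== LEMMAS AND PROOFS =====

-- The common reference predicate: the word occurs at index i of the lowered definition with a
-- delimiter (or the string edge) on both sides.
def pvGood (d w : List Char) (i : Nat) : Prop :=
  i + w.length ≤ d.length ∧ w <+: d.drop i ∧
  (i = 0 ∨ (d[i-1]?).all (fun c => decide (c ∈ pvDelims)) = true) ∧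
  (d[i+w.length]?).all (fun c => decide (c ∈ pvDelims)) = true

lemma pv_contains_eq (c : Char) :
    pvDelimSet.contains c = decide (c ∈ pvDelims) := by
  have h : (pvDelimSet : List Char) = pvDelims := by decide
  show List.contains (pvDelimSet : List Char) c = decide (c ∈ pvDelims)
  rw [h, List.contains_eq_mem]

theorem pv_alt_iff (df wd : String) :
    has_same_word_alt df wd = true ↔
      ∃ i : Nat, pvGood (PySem.Chars.lower df.toList) wd.toList i := by
  unfold has_same_word_alt
  set d := PySem.Chars.lower df.toList with hd
  set w := wd.toList with hw
  rw [List.any_eq_true]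
  constructor
  · rintro ⟨i, hmem, hp⟩
    rw [PySem.List.mem_pyRange_one] at hmem
    obtain ⟨h0, h1⟩ := hmem
    lift i to Nat using h0 with j
    have hjm : j + w.length ≤ d.length := by omega
    refine ⟨j, ?_⟩
    simp only [Bool.and_eq_true, beq_iff_eq] at hp
    obtain ⟨⟨hslice, hbefore⟩, hafter⟩ := hp
    rw [PySem.List.slice_natCast_add] at hslice
    refine ⟨hjm, ?_, ?_, ?_⟩
    · rw [List.prefix_iff_eq_take]; exact hslice.symm
    · by_cases hj0 : j = 0
      · exact Or.inl hj0
      · right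
        have h : (PySem.List.pyGet? d ((j : Int) - 1)).all (fun x => pvDelimSet.contains x) = true := by
          rcases Bool.or_eq_true_iff.mp hbefore with h | h
          · exact absurd (by exact_mod_cast beq_iff_eq.mp h) hj0
          · exact h
        have hcast : ((j : Int) - 1) = ((j - 1 : Nat) : Int) := by omega
        rw [hcast, PySem.List.pyGet?_natCast] at h
        simpa [pv_contains_eq] using h
    · by_cases hend : j + w.length = d.length
      · have : d[j + w.length]? = none := by
          rw [List.getElem?_eq_none_iff]; omega
        simp [this]
      · have h : (PySem.List.pyGet? d ((j : Int) + (w.length : Int))).all (fun x => pvDelimSet.contains x) = true := by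
          rcases Bool.or_eq_true_iff.mp hafter with h | h
          · exact absurd (by exact_mod_cast beq_iff_eq.mp h) hend
          · exact h
        have hcast : ((j : Int) + (w.length : Int)) = ((j + w.length : Nat) : Int) := by push_cast; ring
        rw [hcast, PySem.List.pyGet?_natCast] at h
        simpa [pv_contains_eq] using h
  · rintro ⟨j, hjm, hpre, hbef, haft⟩
    refine ⟨(j : Int), ?_, ?_⟩
    · rw [PySem.List.mem_pyRange_one]
      exact ⟨Int.natCast_nonneg j, by omega⟩
    · simp only [Bool.and_eq_true, beq_iff_eq]
      refine ⟨⟨?_, ?_⟩, ?_⟩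
      · rw [PySem.List.slice_natCast_add]
        rw [List.prefix_iff_eq_take] at hpre
        exact hpre.symm
      · by_cases hj0 : j = 0
        · apply Bool.or_eq_true_iff.mpr; left; simp [hj0]
        · apply Bool.or_eq_true_iff.mpr; right
          rcases hbef with h | h
          · exact absurd h hj0
          · have hcast : ((j : Int) - 1) = ((j - 1 : Nat) : Int) := by omega
            rw [hcast, PySem.List.pyGet?_natCast]
            simpa [pv_contains_eq] using h
      · by_cases hend : j + w.length = d.length
        · apply Bool.or_eq_true_iff.mpr; left; rw [beq_iff_eq]; omega
        · apply Bool.or_eq_true_iff.mpr; right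
          have hcast : ((j : Int) + (w.length : Int)) = ((j + w.length : Nat) : Int) := by push_cast; ring
          rw [hcast, PySem.List.pyGet?_natCast]
          simpa [pv_contains_eq] using haft

lemma pv_findFrom_past (s sub : List Char) (k : Nat) (h : s.length < k) :
    PySem.Chars.findFrom s sub (k : Int) none = -1 := by
  simp [PySem.Chars.findFrom]
  omega

lemma pv_after_iff (d : List Char) (k : Nat) :
    (PySem.Chars.find pvDelims (PySem.Chars.slice d (some (k : Int)) (some ((k : Int) + 1))) > -1) ↔
      (d[k]?).all (fun c => decide (c ∈ pvDelims)) = true := by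
  rw [show ((k : Int) + 1) = ((k + 1 : Nat) : Int) by push_cast; ring]
  rw [PySem.Chars.slice_eq_listSlice, PySem.List.slice_natCast]
  have h1 : k + 1 - k = 1 := by omega
  rw [h1, List.take_one, List.head?_drop]
  cases h : d[k]? with
  | none => simp [PySem.Chars.find_nil]
  | some c =>
      simp only [Option.toList, Option.all]
      constructor
      · intro hgt
        have : (0:Int) ≤ PySem.Chars.find pvDelims [c] := by omega
        rw [PySem.Chars.find_nonneg_iff, List.singleton_infix_iff] at this
        simpa using this
      · intro hc
        have : c ∈ pvDelims := by simpa using hc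
        have : (0:Int) ≤ PySem.Chars.find pvDelims [c] := by
          rw [PySem.Chars.find_nonneg_iff, List.singleton_infix_iff]; exact this
        omega



lemma pv_infix_of_prefix_drop (d w : List Char) (k i : Nat) (hki : k ≤ i)
    (h : w <+: d.drop i) : w <:+: d.drop k := by
  have hdd : (d.drop k).drop (i - k) = d.drop i := by
    rw [List.drop_drop]; congr 1; omega
  exact (hdd ▸ h).isInfix.trans (List.drop_suffix (i - k) (d.drop k)).isInfix

theorem pv_loop_iff (d w : List Char) (fuel : Nat) : ∀ (k : Nat),
    d.length + 1 ≤ k + fuel →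
    (pvHswLoop d w ((w.length : Nat) : Int) ((k : Int) - 1) fuel = true ↔
      ∃ i : Nat, k ≤ i ∧ pvGood d w i) := by
  induction fuel with
  | zero =>
      intro k hf
      simp only [pvHswLoop, Bool.false_eq_true, false_iff]
      rintro ⟨i, hki, hg⟩
      exact absurd hg.1 (by omega)
  | succ fuel ih =>
      intro k hf
      have hk1 : ((k : Int) - 1 + 1) = (k : Int) := by ring
      simp only [pvHswLoop]
      rw [hk1]
      by_cases hk : k ≤ d.length
      · by_cases hp : PySem.Chars.findFrom d w (k : Int) none = -1
        · rw [if_pos hp]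
          simp only [Bool.false_eq_true, false_iff]
          rintro ⟨i, hki, hg⟩
          rw [PySem.Chars.findFrom_natCast_eq_neg_one_iff d w k hk] at hp
          exact hp (pv_infix_of_prefix_drop d w k i hki hg.2.1)
        · -- an occurrence was found at q
          obtain ⟨hge, hprefix, hmin⟩ := PySem.Chars.findFrom_natCast_spec d w k hk hp
          have hf0 : (0:Int) ≤ PySem.Chars.findFrom d w (k : Int) none :=
            le_trans (Int.natCast_nonneg k) hge
          have hfq : PySem.Chars.findFrom d w (k : Int) none =
              (((PySem.Chars.findFrom d w (k : Int) none).toNat : Nat) : Int) :=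
            (Int.toNat_of_nonneg hf0).symm
          rw [hfq] at hge hmin ⊢
          generalize hq : (PySem.Chars.findFrom d w (k : Int) none).toNat = q at *
          have hpref : w <+: d.drop q := hprefix
          have hkq : k ≤ q := by exact_mod_cast hge
          have hqlen : q ≤ d.length := by
            have h1 := PySem.Chars.findFrom_natCast d w k hk
            have h2 := PySem.Chars.find_le_length (d.drop k) w
            rw [List.length_drop] at h2
            by_cases hcc : PySem.Chars.find (d.drop k) w = -1
            · rw [if_pos hcc] at h1; rw [h1] at hfq; omega
            · rw [if_neg hcc] at h1; rw [h1] at hfq; omega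
          have hqm : q + w.length ≤ d.length := by
            have := hpref.length_le
            rw [List.length_drop] at this
            omega
          rw [if_neg (by omega : ¬ ((q : Int) = -1))]
          have haiff : (PySem.Chars.find pvDelims
              (PySem.Chars.slice d (some ((q:Int) + (w.length : Nat))) (some ((q:Int) + (w.length : Nat) + 1))) > -1) ↔
              (d[q + w.length]?).all (fun c => decide (c ∈ pvDelims)) = true := by
            rw [show ((q:Int) + ((w.length : Nat) : Int)) = ((q + w.length : Nat) : Int) by push_cast; ring]
            exact pv_after_iff d (q + w.length)
          by_cases haf : (d[q + w.length]?).all (fun c => decide (c ∈ pvDelims)) = true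
          · rw [if_pos (haiff.mpr haf)]
            by_cases hq0 : q = 0
            · rw [if_neg (by omega : ¬ ((q:Int) > 0))]
              simp only [true_iff]
              exact ⟨q, hkq, hqm, hpref, Or.inl hq0, haf⟩
            · rw [if_pos (by omega : ((q:Int) > 0))]
              have hbiff : (PySem.Chars.find pvDelims
                  (PySem.Chars.slice d (some ((q:Int) - 1)) (some (q:Int))) > -1) ↔
                  (d[q - 1]?).all (fun c => decide (c ∈ pvDelims)) = true := by
                rw [show ((q:Int) - 1) = ((q - 1 : Nat) : Int) by omega,
                    show ((q:Int)) = (((q - 1 : Nat) : Int) + 1) by omega]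
                exact pv_after_iff d (q - 1)
              by_cases hbf : (d[q - 1]?).all (fun c => decide (c ∈ pvDelims)) = true
              · rw [if_pos (hbiff.mpr hbf)]
                simp only [true_iff]
                exact ⟨q, hkq, hqm, hpref, Or.inr hbf, haf⟩
              · rw [if_neg (fun h => hbf (hbiff.mp h))]
                rw [show ((q : Int)) = (((q+1 : Nat) : Int) - 1) by push_cast; ring,
                    ih (q+1) (by omega)]
                constructor
                · rintro ⟨i, hqi, hg⟩; exact ⟨i, by omega, hg⟩
                · rintro ⟨i, hki, hg⟩
                  refine ⟨i, ?_, hg⟩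
                  rcases Nat.lt_or_ge i q with hlt | hge'
                  · exact absurd hg.2.1 (hmin i hki hlt)
                  · rcases Nat.eq_or_lt_of_le hge' with heq | hlt'
                    · exfalso
                      rcases hg.2.2.1 with h0 | hb
                      · omega
                      · rw [heq] at hbf; exact hbf hb
                    · omega
          · rw [if_neg (fun h => haf (haiff.mp h))]
            rw [show ((q : Int)) = (((q+1 : Nat) : Int) - 1) by push_cast; ring,
                ih (q+1) (by omega)]
            constructor
            · rintro ⟨i, hqi, hg⟩; exact ⟨i, by omega, hg⟩
            · rintro ⟨i, hki, hg⟩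
              refine ⟨i, ?_, hg⟩
              rcases Nat.lt_or_ge i q with hlt | hge'
              · exact absurd hg.2.1 (hmin i hki hlt)
              · rcases Nat.eq_or_lt_of_le hge' with heq | hlt'
                · exfalso; rw [heq] at haf; exact haf hg.2.2.2
                · omega
      · have hp : PySem.Chars.findFrom d w (k : Int) none = -1 :=
          pv_findFrom_past d w k (by omega)
        rw [if_pos hp]
        simp only [Bool.false_eq_true, false_iff]
        rintro ⟨i, hki, hg⟩
        exact absurd hg.1 (by omega)

-- ===== VERDICT (by name: the statement is the Claim_ definition above) =====
theorem has_same_word_spec : Claim_equal_has_same_word := by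
  intro df wd _
  unfold Spec_has_same_word
  rw [Bool.eq_iff_iff, has_same_word, pv_alt_iff]
  have h := pv_loop_iff (PySem.Chars.lower df.toList) wd.toList
      ((PySem.Chars.lower df.toList).length + 2) 0 (by omega)
  simp only [Nat.cast_zero, zero_sub] at h
  rw [h]
  simp
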